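-- pv_equiv track=rewrite | github.com/derijkg/internship | src/myutils.py | dict_dupes
-- ===== SOURCE A (Python) =====
-- def dict_dupes(list_of_dicts, keys):
--     """
--     Identifies duplicate dictionaries in a list based on a subset of keys.
--
--     Args:
--         list_of_dicts (list): The list of dictionaries to check.
--         keys (list): A list of key names to use for identifying duplicates.
--
--     Returns:
--         list: A list of dictionaries that are considered duplicates.
--     """
--     seen = set()
--     duplicates = []
--     for d in list_of_dicts:
--         # Create a tuple of the values for the keys to check.
--         # A tuple is used because it's hashable and can be added to a set.
--         identifier = tuple(d.get(key) for key in keys)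
--         if identifier in seen:
--             duplicates.append(d)
--         else:
--             seen.add(identifier)
--     return duplicates
-- ===== SOURCE B (Python) =====
-- def dict_dupes(list_of_dicts, keys):
--     # Stage 1: group positions by identifier tuple.
--     pairs = [(tuple(d.get(key) for key in keys), i)
--              for i, d in enumerate(list_of_dicts)]
--     groups = {}
--     for ident, i in pairs:
--         groups[ident] = groups.get(ident, []) + [i]
--     # Stage 2: every position except the first of each group is a duplicate;
--     # restore original order by sorting the positions.
--     dup = sorted(i for idxs in groups.values() for i in idxs[1:])
--     return [list_of_dicts[i] for i in dup]
-- ===== Notes on version B (the rewrite author's own statement) =====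
-- stated objective: alternative
-- what changed: B replaces A's one-pass seen-set stream with staged passes over a grouping index: it builds a dict mapping each identifier tuple to the list of positions where it occurs, collects every position except the first of each group, sorts those positions and reads the dicts back out in original order.
import Mathlib
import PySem

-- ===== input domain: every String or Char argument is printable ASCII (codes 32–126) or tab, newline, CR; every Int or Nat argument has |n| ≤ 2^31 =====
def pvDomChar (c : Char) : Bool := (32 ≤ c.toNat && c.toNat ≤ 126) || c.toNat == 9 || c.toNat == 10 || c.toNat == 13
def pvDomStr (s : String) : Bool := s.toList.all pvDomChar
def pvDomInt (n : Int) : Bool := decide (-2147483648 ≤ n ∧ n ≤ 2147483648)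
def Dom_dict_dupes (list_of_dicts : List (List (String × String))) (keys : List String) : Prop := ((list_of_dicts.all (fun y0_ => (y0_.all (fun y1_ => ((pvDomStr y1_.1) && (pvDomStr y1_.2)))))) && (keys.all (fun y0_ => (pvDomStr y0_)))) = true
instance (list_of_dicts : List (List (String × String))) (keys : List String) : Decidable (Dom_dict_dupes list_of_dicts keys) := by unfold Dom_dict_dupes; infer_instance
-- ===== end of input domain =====

-- ===== PORT A =====
-- B is an alternative staged decomposition (group positions by identifier, collect non-first
-- positions, sort, read back); return-value equivalence only (neither program mutates).
-- identifier = tuple(d.get(key) for key in keys); d.get = first-match lookup on the association list.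
def pvIdent (keys : List String) (d : List (String × String)) : List (Option String) :=
  keys.map (fun k => (PySem.Dict.mk d).get? k)

def dict_dupes (list_of_dicts : List (List (String × String))) (keys : List String) : List (List (String × String)) :=
  (list_of_dicts.foldl
    (fun (st : PySem.Set (List (Option String)) × List (List (String × String))) d =>
      let identifier := pvIdent keys d
      if PySem.Set.contains st.1 identifier then (st.1, st.2 ++ [d])
      else (PySem.Set.add st.1 identifier, st.2))
    (PySem.Set.empty, [])).2

-- ===== PORT B =====
def dict_dupes_alt (list_of_dicts : List (List (String × String))) (keys : List String) : List (List (String × String)) :=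
  -- pairs = [(identifier, i) for i, d in enumerate(list_of_dicts)]
  let pairs := (PySem.List.enumerate list_of_dicts).map (fun p => (pvIdent keys p.2, p.1))
  -- groups[ident] = groups.get(ident, []) + [i]
  let groups := pairs.foldl
    (fun (d : PySem.Dict (List (Option String)) (List Int)) p => d.modify p.1 [] (fun x => x ++ [p.2]))
    PySem.Dict.empty
  -- dup = sorted(i for idxs in groups.values() for i in idxs[1:])
  let dup := PySem.List.sorted (groups.values.flatMap (fun idxs => PySem.List.slice idxs (some 1))) (fun i => i) false
  -- [list_of_dicts[i] for i in dup]: every i is a valid index, so pyGet? is always some here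
  dup.filterMap (fun i => PySem.List.pyGet? list_of_dicts i)

-- ===== PRECONDITION & SPEC =====
def Spec_dict_dupes (list_of_dicts : List (List (String × String))) (keys : List String) (out : List (List (String × String))) : Prop := out = dict_dupes_alt list_of_dicts keys
instance (list_of_dicts : List (List (String × String))) (keys : List String) (out : List (List (String × String))) : Decidable (Spec_dict_dupes list_of_dicts keys out) := by unfold Spec_dict_dupes; infer_instance

-- ===== CLAIM (what is proved, stated in full; the proofs are below) =====
def Claim_equal_dict_dupes : Prop := ∀ (list_of_dicts : List (List (String × String))) (keys : List String), Dom_dict_dupes list_of_dicts keys → Spec_dict_dupes list_of_dicts keys (dict_dupes list_of_dicts keys)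

-- ===== LEMMAS AND PROOFS =====

-- identifiers of the whole list, and the positions where identifier t occurs (in order)
def pvIds (lst : List (List (String × String))) (keys : List String) : List (List (Option String)) :=
  lst.map (pvIdent keys)

def pvOcc (lst : List (List (String × String))) (keys : List String) (t : List (Option String)) : List Int :=
  ((((PySem.List.enumerate lst).map (fun p => (pvIdent keys p.2, p.1))).filter (fun q => q.1 == t)).map (·.2))

-- positions of non-first occurrences, grouped by identifier (B's unsorted duplicate positions)
def pvDupPre (lst : List (List (String × String))) (keys : List String) : List Int :=
  (PySem.Set.ofList (pvIds lst keys)).flatMap (fun t => (pvOcc lst keys t).drop 1)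

-- positions of non-first occurrences in original order (the common reference point)
def pvIdx (lst : List (List (String × String))) (keys : List String) : List Int :=
  (PySem.List.enumerate lst).filterMap
    (fun p => if ((pvIds lst keys).take p.1.toNat).contains (pvIdent keys p.2) then some p.1 else none)

-- A-side characterisation: emit d iff its identifier is in the accumulated identifier list
def pvAux (f : List (String × String) → List (Option String)) :
    List (List (Option String)) → List (List (String × String)) → List (List (String × String))
  | _, [] => []
  | seen, d :: ds =>
    (if seen.contains (f d) then [d] else []) ++ pvAux f (seen ++ [f d]) ds

theorem pvA_aux (keys : List String) (ds : List (List (String × String)))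
    (l : List (List (Option String))) (dups : List (List (String × String))) :
    (ds.foldl
      (fun (st : PySem.Set (List (Option String)) × List (List (String × String))) d =>
        let identifier := pvIdent keys d
        if PySem.Set.contains st.1 identifier then (st.1, st.2 ++ [d])
        else (PySem.Set.add st.1 identifier, st.2))
      (PySem.Set.ofList l, dups)).2
    = dups ++ pvAux (pvIdent keys) l ds := by
  induction ds generalizing l dups with
  | nil => simp [pvAux]
  | cons d ds ih =>
    rw [List.foldl_cons]
    by_cases h : pvIdent keys d ∈ l
    · have hmem : pvIdent keys d ∈ PySem.Set.ofList l := (PySem.Set.mem_ofList _ _).mpr h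
      have hc : PySem.Set.contains (PySem.Set.ofList l) (pvIdent keys d) = true :=
        (PySem.Set.contains_iff _ _).mpr hmem
      simp only [hc, if_true]
      rw [show PySem.Set.ofList l = PySem.Set.ofList (l ++ [pvIdent keys d]) by
            rw [PySem.Set.ofList_append_singleton, PySem.Set.add_of_mem hmem]]
      rw [ih]
      simp [pvAux, h]
    · have hnc : PySem.Set.contains (PySem.Set.ofList l) (pvIdent keys d) = false := by
        rw [Bool.eq_false_iff]
        intro hc'
        exact h ((PySem.Set.mem_ofList _ _).mp ((PySem.Set.contains_iff _ _).mp hc'))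
      simp only [hnc, Bool.false_eq_true, if_false]
      rw [← PySem.Set.ofList_append_singleton]
      rw [ih]
      simp [pvAux, h]

theorem pvB_aux (keys : List String) (ds pre : List (List (String × String))) :
    (PySem.List.enumerate ds (pre.length : Int)).filterMap
      (fun p => if (((pre ++ ds).map (pvIdent keys)).take p.1.toNat).contains (pvIdent keys p.2)
                then some p.2 else none)
    = pvAux (pvIdent keys) (pre.map (pvIdent keys)) ds := by
  induction ds generalizing pre with
  | nil => simp [PySem.List.enumerate_nil, pvAux]
  | cons d ds ih =>
    rw [PySem.List.enumerate_cons, List.filterMap_cons]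
    have htake : (((pre ++ d :: ds).map (pvIdent keys)).take (pre.length : Int).toNat)
        = pre.map (pvIdent keys) := by
      simp [List.map_append]
    have hrest := ih (pre ++ [d])
    have hlen : ((pre ++ [d]).length : Int) = (pre.length : Int) + 1 := by simp
    rw [hlen] at hrest
    have hlist : (pre ++ [d]) ++ ds = pre ++ d :: ds := by simp
    rw [hlist] at hrest
    rw [htake, hrest]
    by_cases hC : pvIdent keys d ∈ pre.map (pvIdent keys) <;>
      simp [pvAux, hC, List.map_append]

-- A equals the element filter over enumerate
theorem pvA_char (lst : List (List (String × String))) (keys : List String) :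
    dict_dupes lst keys
      = (PySem.List.enumerate lst).filterMap
          (fun p => if ((pvIds lst keys).take p.1.toNat).contains (pvIdent keys p.2)
                    then some p.2 else none) := by
  have hA := pvA_aux keys lst [] []
  have hB := pvB_aux keys lst []
  simp only [List.nil_append, List.map_nil, List.length_nil, Nat.cast_zero] at hA hB
  unfold dict_dupes pvIds
  rw [show PySem.Set.empty = PySem.Set.ofList ([] : List (List (Option String))) from rfl]
  rw [hA, ← hB]
  rfl

-- reading elements back from the kept positions gives the element filter
theorem pvIdx_get (lst : List (List (String × String))) (keys : List String) :
    (pvIdx lst keys).filterMap (fun i => PySem.List.pyGet? lst i)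
      = (PySem.List.enumerate lst).filterMap
          (fun p => if ((pvIds lst keys).take p.1.toNat).contains (pvIdent keys p.2)
                    then some p.2 else none) := by
  unfold pvIdx
  rw [List.filterMap_filterMap]
  apply List.filterMap_congr
  intro p hp
  obtain ⟨k, hk, rfl⟩ := (PySem.List.mem_enumerate_iff lst 0 p).mp hp
  simp only [zero_add, Int.toNat_natCast]
  by_cases hm : pvIdent keys lst[k] ∈ (pvIds lst keys).take k <;>
    simp [hm, hk]

-- B equals (sorted non-first positions grouped by identifier) read back
theorem pvB_char (lst : List (List (String × String))) (keys : List String) :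
    dict_dupes_alt lst keys
      = (PySem.List.sorted (pvDupPre lst keys) (fun i => i) false).filterMap
          (fun i => PySem.List.pyGet? lst i) := by
  unfold dict_dupes_alt pvDupPre
  dsimp only
  have hkeys : ((((PySem.List.enumerate lst).map (fun p => (pvIdent keys p.2, p.1))).foldl
      (fun (d : PySem.Dict (List (Option String)) (List Int)) p => d.modify p.1 [] (fun x => x ++ [p.2]))
      PySem.Dict.empty)).keys = PySem.Set.ofList (pvIds lst keys) := by
    rw [PySem.Dict.keys_foldl_modify_key
        (l := (PySem.List.enumerate lst).map (fun p => (pvIdent keys p.2, p.1)))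
        (key := fun (p : List (Option String) × Int) => p.1) (d0 := ([] : List Int))
        (f := fun _ p => fun x => x ++ [p.2]) (d := PySem.Dict.empty)]
    rw [PySem.Dict.keys_empty]
    show PySem.Set.ofList _ = _
    congr 1
    rw [List.map_map]
    show (PySem.List.enumerate lst).map (fun p => pvIdent keys p.2) = _
    rw [show (fun (p : Int × List (String × String)) => pvIdent keys p.2)
          = (pvIdent keys) ∘ (fun p => p.2) from rfl]
    rw [← List.map_map, PySem.List.map_snd_enumerate]
    rfl
  have hnodup : ((((PySem.List.enumerate lst).map (fun p => (pvIdent keys p.2, p.1))).foldl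
      (fun (d : PySem.Dict (List (Option String)) (List Int)) p => d.modify p.1 [] (fun x => x ++ [p.2]))
      PySem.Dict.empty)).keys.Nodup := by
    rw [hkeys]; exact PySem.Set.nodup_ofList _
  rw [PySem.Dict.values_eq_map_keys _ hnodup []]
  rw [hkeys]
  congr 2
  rw [List.flatMap_map]
  apply List.flatMap_congr
  intro t _
  rw [PySem.Dict.getD_foldl_modify_append]
  rw [PySem.Dict.getD_empty, List.nil_append]
  rw [PySem.List.slice_from _ (by norm_num : (0:Int) ≤ 1)]
  rfl

-- first components of the (identifier, position) pairs are exactly the identifiers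
theorem pvPairs_fst (lst : List (List (String × String))) (keys : List String) :
    (((PySem.List.enumerate lst).map (fun p => (pvIdent keys p.2, p.1))).map (·.1))
      = pvIds lst keys := by
  rw [List.map_map]
  show (PySem.List.enumerate lst).map (fun p => pvIdent keys p.2) = _
  rw [show (fun (p : Int × List (String × String)) => pvIdent keys p.2)
        = (pvIdent keys) ∘ (fun p => p.2) from rfl]
  rw [← List.map_map, PySem.List.map_snd_enumerate]
  rfl

theorem pvOcc_nil (lst : List (List (String × String))) (keys : List String)
    (t : List (Option String)) (h : t ∉ pvIds lst keys) : pvOcc lst keys t = [] := by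
  unfold pvOcc
  rw [List.map_eq_nil_iff, List.filter_eq_nil_iff]
  intro q hq
  have : q.1 ∈ pvIds lst keys := by
    rw [← pvPairs_fst lst keys]
    exact List.mem_map_of_mem hq
  simp only [beq_iff_eq]
  intro he
  exact h (he ▸ this)

theorem pvOcc_ne_nil (lst : List (List (String × String))) (keys : List String)
    (t : List (Option String)) (h : t ∈ pvIds lst keys) : pvOcc lst keys t ≠ [] := by
  unfold pvOcc
  rw [← pvPairs_fst lst keys] at h
  obtain ⟨q, hq, hq1⟩ := List.mem_map.mp h
  simp only [ne_eq, List.map_eq_nil_iff, List.filter_eq_nil_iff, not_forall]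
  exact ⟨q, hq, by simp [hq1]⟩

theorem pvOcc_append (xs : List (List (String × String))) (x : List (String × String))
    (keys : List String) (s : List (Option String)) :
    pvOcc (xs ++ [x]) keys s
      = pvOcc xs keys s ++ (if pvIdent keys x = s then [((xs.length : Int))] else []) := by
  unfold pvOcc
  rw [PySem.List.enumerate_append, List.map_append, List.filter_append, List.map_append]
  congr 1
  simp [PySem.List.enumerate_cons, PySem.List.enumerate_nil]
  split_ifs with h <;> simp [h]

theorem pvIdx_append (xs : List (List (String × String))) (x : List (String × String))
    (keys : List String) :
    pvIdx (xs ++ [x]) keys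
      = pvIdx xs keys ++ (if pvIdent keys x ∈ pvIds xs keys then [((xs.length : Int))] else []) := by
  unfold pvIdx
  have hids : pvIds (xs ++ [x]) keys = pvIds xs keys ++ [pvIdent keys x] := by
    simp [pvIds]
  rw [PySem.List.enumerate_append, List.filterMap_append]
  congr 1
  · apply List.filterMap_congr
    intro p hp
    obtain ⟨k, hk, rfl⟩ := (PySem.List.mem_enumerate_iff xs 0 p).mp hp
    rw [hids]
    rw [List.take_append_of_le_length (by simpa [pvIds] using le_of_lt (by simpa using hk))]
  · simp only [PySem.List.enumerate_cons, PySem.List.enumerate_nil, List.filterMap_cons,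
      List.filterMap_nil]
    rw [hids]
    have hlen : (((0 : Int) + (xs.length : Int)).toNat) = (pvIds xs keys).length := by
      simp [pvIds]
    rw [hlen, List.take_append_of_le_length (le_refl _), List.take_length]
    by_cases hm : pvIdent keys x ∈ pvIds xs keys <;> simp [hm]

-- replacing one entry's image f t by f t ++ [n] permutes the flatten with [n] appended
theorem pvFlatMap_update_perm {α β : Type} [DecidableEq α] (S : List α) (f f' : α → List β) (t : α) (n : β)
    (hS : S.Nodup) (ht : t ∈ S)
    (hf : ∀ s ∈ S, f' s = f s ++ (if s = t then [n] else [])) :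
    (S.flatMap f').Perm (S.flatMap f ++ [n]) := by
  obtain ⟨S1, S2, rfl⟩ := List.append_of_mem ht
  have hnd := hS
  rw [List.nodup_append] at hnd
  obtain ⟨h1, h2, hdisj⟩ := hnd
  have ht1 : t ∉ S1 := fun hmem => hdisj t hmem t (List.mem_cons_self ..) rfl
  have ht2 : t ∉ S2 := (List.nodup_cons.mp h2).1
  have e1 : S1.flatMap f' = S1.flatMap f := by
    apply List.flatMap_congr
    intro s hs
    rw [hf s (by simp [hs])]
    rw [if_neg (show ¬ s = t from fun he => ht1 (he ▸ hs))]
    simp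
  have e2 : S2.flatMap f' = S2.flatMap f := by
    apply List.flatMap_congr
    intro s hs
    rw [hf s (by simp [hs])]
    rw [if_neg (show ¬ s = t from fun he => ht2 (he ▸ hs))]
    simp
  have et : f' t = f t ++ [n] := by rw [hf t (by simp), if_pos rfl]
  rw [List.flatMap_append, List.flatMap_cons, List.flatMap_append, List.flatMap_cons, e1, e2, et]
  have hmid : ((S1.flatMap f ++ f t) ++ ([n] ++ S2.flatMap f)).Perm
      ((S1.flatMap f ++ f t) ++ (S2.flatMap f ++ [n])) :=
    List.Perm.append_left _ List.perm_append_comm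
  simpa [List.append_assoc] using hmid

-- the grouped non-first positions are a permutation of the ordered ones
theorem pvPerm (lst : List (List (String × String))) (keys : List String) :
    (pvDupPre lst keys).Perm (pvIdx lst keys) := by
  induction lst using List.reverseRecOn with
  | nil =>
    simp [pvDupPre, pvIdx, pvIds]
  | append_singleton xs x ih =>
    have hids : pvIds (xs ++ [x]) keys = pvIds xs keys ++ [pvIdent keys x] := by
      simp [pvIds]
    rw [pvIdx_append]
    unfold pvDupPre
    rw [hids, PySem.Set.ofList_append_singleton]
    by_cases hm : pvIdent keys x ∈ pvIds xs keys
    · rw [if_pos hm]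
      rw [PySem.Set.add_of_mem ((PySem.Set.mem_ofList _ _).mpr hm)]
      have hperm := pvFlatMap_update_perm (PySem.Set.ofList (pvIds xs keys))
        (fun s => (pvOcc xs keys s).drop 1)
        (fun s => (pvOcc (xs ++ [x]) keys s).drop 1)
        (pvIdent keys x) ((xs.length : Int))
        (PySem.Set.nodup_ofList _) ((PySem.Set.mem_ofList _ _).mpr hm)
        (by
          intro s hs
          simp only [pvOcc_append]
          by_cases he : s = pvIdent keys x
          · subst he
            rcases hocc : pvOcc xs keys (pvIdent keys x) with _ | ⟨a, rest⟩
            · exact absurd hocc (pvOcc_ne_nil xs keys _ hm)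
            · simp
          · rw [if_neg (fun hh => he hh.symm), if_neg he]
            simp)
      exact hperm.trans (List.Perm.append_right _ ih)
    · rw [if_neg hm]
      rw [show (PySem.Set.ofList (pvIds xs keys)).add (pvIdent keys x)
            = PySem.Set.ofList (pvIds xs keys) ++ [pvIdent keys x] by
          unfold PySem.Set.add
          have hc : (PySem.Set.ofList (pvIds xs keys)).contains (pvIdent keys x) = false := by
            rw [Bool.eq_false_iff]
            intro hc'
            exact hm ((PySem.Set.mem_ofList _ _).mp ((PySem.Set.contains_iff _ _).mp hc'))
          rw [hc]
          simp]
      rw [List.flatMap_append, List.flatMap_singleton]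
      have hocc0 : pvOcc (xs ++ [x]) keys (pvIdent keys x) = [((xs.length : Int))] := by
        rw [pvOcc_append, pvOcc_nil xs keys _ hm, if_pos rfl]
        simp
      rw [hocc0]
      have e1 : (PySem.Set.ofList (pvIds xs keys)).flatMap
            (fun s => (pvOcc (xs ++ [x]) keys s).drop 1)
          = (PySem.Set.ofList (pvIds xs keys)).flatMap
            (fun s => (pvOcc xs keys s).drop 1) := by
        apply List.flatMap_congr
        intro s hs
        have hs' : s ∈ pvIds xs keys := (PySem.Set.mem_ofList _ _).mp hs
        simp only [pvOcc_append]
        rw [if_neg (fun he => hm (by rw [he]; exact hs'))]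
        simp
      rw [e1]
      unfold pvDupPre at ih
      simpa [List.drop_one] using ih

-- pvIdx is strictly increasing
theorem pvIdx_pairwise (lst : List (List (String × String))) (keys : List String) :
    (pvIdx lst keys).Pairwise (· < ·) := by
  unfold pvIdx
  rw [List.pairwise_filterMap]
  apply (PySem.List.pairwise_lt_enumerate lst 0).imp
  intro p q hpq b hb b' hb'
  split_ifs at hb hb' with h1 h2
  cases hb; cases hb'; exact hpq

theorem pvSorted_idx (lst : List (List (String × String))) (keys : List String) :
    PySem.List.sorted (pvDupPre lst keys) (fun i => i) false = pvIdx lst keys := by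
  apply PySem.List.eq_of_perm_of_pairwise_le_of_injective (fun i : Int => i) (fun _ _ h => h)
  · exact (PySem.List.sorted_perm _ _ _).trans (pvPerm lst keys)
  · exact PySem.List.sorted_pairwise _ _
  · exact (pvIdx_pairwise lst keys).imp (fun h => le_of_lt h)

-- ===== VERDICT (by name: the statement is the Claim_ definition above) =====
theorem dict_dupes_spec : Claim_equal_dict_dupes := by
  intro lst keys _
  show dict_dupes lst keys = dict_dupes_alt lst keys
  rw [pvA_char, pvB_char, pvSorted_idx, pvIdx_get]
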